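-- pv_equiv track=rewrite | github.com/umnstao/leetcodeOJ | 151.reverseStr.py | cleanSpaces
-- ===== SOURCE A (Python) =====
-- def cleanSpaces(a, n):
--     i, j = 0, 0
--     while i < n:
--         while i < n and a[i] == ' ':
--             i += 1
--         while i < n and a[i] != ' ':
--             a[j] = a[i]
--             j += 1
--             i += 1
--         while i < n and a[i] == ' ':
--             i += 1
--         if i < n:
--             a[j] = ' '
--             j += 1
--     return ''.join(a[:j])
-- ===== SOURCE B (Python) =====
-- # Single pass that collects words (maximal runs of non-' ' elements) and joins them
-- # with single spaces; computes the return value only (does not mutate a, unlike A).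
-- def cleanSpaces(a, n):
--     words = []
--     cur = []
--     for x in a[:max(n, 0)]:
--         if x == ' ':
--             if cur:
--                 words.append(''.join(cur))
--                 cur = []
--         else:
--             cur.append(x)
--     if cur:
--         words.append(''.join(cur))
--     return ' '.join(words)
-- ===== Notes on version B (the rewrite author's own statement) =====
-- stated objective: simpler
-- what changed: Replaces the in-place two-pointer compaction (skip spaces / copy word / write separator into the array) with a single accumulating pass that collects the maximal runs of non-space elements as words and joins them with single spaces; equivalence is about the return value only (B does not mutate a).
import Mathlib
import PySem

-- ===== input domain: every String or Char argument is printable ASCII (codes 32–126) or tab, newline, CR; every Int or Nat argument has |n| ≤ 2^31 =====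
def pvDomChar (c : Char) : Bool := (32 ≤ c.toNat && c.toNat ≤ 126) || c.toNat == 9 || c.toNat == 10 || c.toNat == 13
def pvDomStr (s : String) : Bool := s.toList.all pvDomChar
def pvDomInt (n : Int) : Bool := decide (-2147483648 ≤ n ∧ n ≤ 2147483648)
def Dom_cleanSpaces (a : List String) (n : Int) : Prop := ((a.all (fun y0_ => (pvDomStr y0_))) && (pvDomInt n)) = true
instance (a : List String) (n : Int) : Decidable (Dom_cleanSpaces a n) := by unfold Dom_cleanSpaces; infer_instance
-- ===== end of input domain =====

-- B replaces A's in-place two-pointer compaction with a single word-collecting pass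
-- joined by single spaces (objective: simpler); equivalence is about the return value
-- only — A mutates a in place, B does not.

-- ===== PORT A =====
-- measure arithmetic for the while-loops' termination (cited by the decreasing_by below)
theorem decStep {n i : Int} (h : i < n) : (n - (i + 1)).toNat < (n - i).toNat := by omega
theorem decOuter {n i i3 : Int} (hlt : i < i3) (h : i < n) : (n - i3).toNat < (n - i).toNat := by
  omega
theorem decExit {n i i3 : Int} (h : i < n) (h3 : ¬ i3 < n) : (n - i3).toNat < (n - i).toNat := by
  omega

-- inner `while i < n and a[i] == ' '` loops
def skipA (a : List String) (n i : Int) : Int :=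
  if h : i < n ∧ PySem.List.pyGetD a i "" = " " then skipA a n (i + 1) else i
termination_by (n - i).toNat
decreasing_by exact decStep h.1

-- inner `while i < n and a[i] != ' '` loop (a[j] = a[i]; j += 1; i += 1)
def copyA (a : List String) (n i j : Int) : List String × Int × Int :=
  if h : i < n ∧ ¬ PySem.List.pyGetD a i "" = " " then
    copyA (PySem.List.pySetD a j (PySem.List.pyGetD a i "")) n (i + 1) (j + 1)
  else (a, i, j)
termination_by (n - i).toNat
decreasing_by exact decStep h.1

-- the next three lemmas are cited by loopA's decreasing_by (the outer while makes progress)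
theorem skipA_ge (a : List String) (n i : Int) : i ≤ skipA a n i := by
  fun_induction skipA a n i with
  | case1 h ih => omega
  | case2 h => omega

theorem copyA_ige (a : List String) (n i j : Int) : i ≤ (copyA a n i j).2.1 := by
  fun_induction copyA a n i j with
  | case1 h ih => omega
  | case2 h => simp

theorem loop_progress (a : List String) (n i j : Int) (h : i < n) :
    i < skipA (copyA a n (skipA a n i) j).1 n (copyA a n (skipA a n i) j).2.1 := by
  have h1 := skipA_ge a n i
  rcases eq_or_lt_of_le h1 with he | hlt
  · -- skip left i unchanged, so a[i] ≠ ' ' and copyA advances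
    have hx : ¬ PySem.List.pyGetD a i "" = " " := by
      rw [skipA] at he
      split at he
      · exfalso; have := skipA_ge a n (i + 1); omega
      · rename_i hc; push Not at hc; exact fun hh => absurd (hc h) (by simp [hh])
    have h2 : i < (copyA a n (skipA a n i) j).2.1 := by
      rw [← he, copyA, dif_pos ⟨h, hx⟩]
      have := copyA_ige (PySem.List.pySetD a j (PySem.List.pyGetD a i "")) n (i + 1) (j + 1)
      omega
    have := skipA_ge (copyA a n (skipA a n i) j).1 n (copyA a n (skipA a n i) j).2.1
    omega
  · have h2 := copyA_ige a n (skipA a n i) j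
    have := skipA_ge (copyA a n (skipA a n i) j).1 n (copyA a n (skipA a n i) j).2.1
    omega

-- the outer `while i < n` loop; returns the final (a, j)
def loopA (a : List String) (n i j : Int) : List String × Int :=
  if h : i < n then
    let r := copyA a n (skipA a n i) j
    let i3 := skipA r.1 n r.2.1
    if h3 : i3 < n then loopA (PySem.List.pySetD r.1 r.2.2 " ") n i3 (r.2.2 + 1)
    else loopA r.1 n i3 r.2.2
  else (a, j)
termination_by (n - i).toNat
decreasing_by
  · exact decOuter (loop_progress a n i j h) h
  · exact decExit h h3

def cleanSpaces (a : List String) (n : Int) : String :=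
  let r := loopA a n 0 0
  PySem.Str.join "" (PySem.List.slice r.1 none (some r.2))

-- ===== PORT B =====
-- one step of B's for-loop over the prefix: state = (words so far, current run)
def bStep (st : List String × List String) (x : String) : List String × List String :=
  if x = " " then (if st.2 = [] then st else (st.1 ++ [PySem.Str.join "" st.2], ([] : List String)))
  else (st.1, st.2 ++ [x])

def cleanSpaces_alt (a : List String) (n : Int) : String :=
  let st := (PySem.List.slice a none (some (max n 0))).foldl bStep ([], [])
  let ws := if st.2 = [] then st.1 else st.1 ++ [PySem.Str.join "" st.2]
  PySem.Str.join " " ws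

-- ===== PRECONDITION & SPEC =====
-- Pre_ excludes exactly the inputs where A raises IndexError (reading a[i] past the end).
def Pre_cleanSpaces (a : List String) (n : Int) : Prop := n ≤ (a.length : Int)
instance (a : List String) (n : Int) : Decidable (Pre_cleanSpaces a n) := by
  unfold Pre_cleanSpaces; infer_instance

def pvWitness_cleanSpaces : List String × Int := ([" ", "ab", " ", " ", "c", "d"], 5)

def Spec_cleanSpaces (a : List String) (n : Int) (out : String) : Prop := out = cleanSpaces_alt a n
instance (a : List String) (n : Int) (out : String) : Decidable (Spec_cleanSpaces a n out) := by
  unfold Spec_cleanSpaces; infer_instance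

-- ===== CLAIM (what is proved, stated in full; the proofs are below) =====
def Claim_equal_cleanSpaces : Prop := ∀ (a : List String) (n : Int), Dom_cleanSpaces a n → Pre_cleanSpaces a n → Spec_cleanSpaces a n (cleanSpaces a n)


-- ===== LEMMAS AND PROOFS =====

-- the window a[i:n] of the (partially overwritten) array, as a list
def seg (a : List String) (i n : Int) : List String := (a.take n.toNat).drop i.toNat

-- characters of ''.join(l)
def cat (l : List String) : List Char := (l.map String.toList).flatten

-- words of the remaining window, given the current partial word `cur`
def wordsCont : List String → List String → List String
  | cur, [] => if cur = [] then [] else [PySem.Str.join "" cur]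
  | cur, x :: t =>
      if x = " " then (if cur = [] then [] else [PySem.Str.join "" cur]) ++ wordsCont [] t
      else wordsCont (cur ++ [x]) t

-- characters of ' '.join(ws)
def sj (ws : List String) : List Char := ([' '] : List Char).intercalate (ws.map String.toList)

theorem nil_intercalate (xss : List (List Char)) : ([] : List Char).intercalate xss = xss.flatten := by
  induction xss with
  | nil => simp [List.intercalate]
  | cons x t ih =>
    cases t with
    | nil => simp [List.intercalate, List.intersperse]
    | cons y tt =>
      simp only [List.intercalate, List.intersperse] at *
      simp_all

theorem cons_intercalate (sep x : List Char) (y : List Char) (t : List (List Char)) :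
    sep.intercalate (x :: y :: t) = x ++ sep ++ sep.intercalate (y :: t) := by
  simp [List.intercalate, List.intersperse]

theorem toList_join0 (l : List String) : (PySem.Str.join "" l).toList = cat l := by
  simp [PySem.Str.join, PySem.Chars.join, String.toList_ofList, cat]
  rw [nil_intercalate]

theorem sj_eq (ws : List String) : (PySem.Str.join " " ws).toList = sj ws := by
  simp [PySem.Str.join, PySem.Chars.join, String.toList_ofList, sj]

theorem cat_append (l l' : List String) : cat (l ++ l') = cat l ++ cat l' := by
  simp [cat]

theorem sj_cons (x : String) (ws : List String) :
    sj (x :: ws) = x.toList ++ (if ws = [] then [] else ' ' :: sj ws) := by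
  cases ws with
  | nil => simp [sj, List.intercalate]
  | cons y t => rw [sj, List.map_cons, List.map_cons, cons_intercalate]; simp [sj]

theorem seg_nil (a : List String) (i n : Int) (h : n ≤ i) : seg a i n = [] := by
  apply List.drop_eq_nil_of_le
  simp [List.length_take]
  omega

theorem seg_cons (a : List String) (i n : Int) (h0 : 0 ≤ i) (h : i < n) (hn : n ≤ (a.length : Int)) :
    seg a i n = PySem.List.pyGetD a i "" :: seg a (i + 1) n := by
  have hlt : i.toNat < (a.take n.toNat).length := by simp [List.length_take]; omega
  rw [seg, List.drop_eq_getElem_cons hlt, List.getElem_take,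
      PySem.List.pyGetD_eq_getElem a "" h0 (by omega), seg,
      show (i + 1).toNat = i.toNat + 1 by omega]

theorem seg_set_high (a : List String) (v : String) (i n j : Int) (h0 : 0 ≤ j) (h : j < i) :
    seg (a.set j.toNat v) i n = seg a i n := by
  rw [seg, seg, List.take_set, List.drop_set, if_pos (by omega)]

theorem wordsCont_ne_nil (cur : List String) (l : List String) (h : cur ≠ []) :
    wordsCont cur l ≠ [] := by
  induction l generalizing cur with
  | nil => simp [wordsCont, h]
  | cons x t ih =>
    rw [wordsCont]
    split
    · simp
    · exact ih (cur ++ [x]) (by simp)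

theorem wordsCont_run (w : List String) (cur l : List String) (hw : ∀ x ∈ w, x ≠ " ") :
    wordsCont cur (w ++ l) = wordsCont (cur ++ w) l := by
  induction w generalizing cur with
  | nil => simp
  | cons x w' ih =>
    rw [List.cons_append, wordsCont, if_neg (hw x (by simp)), ih (cur ++ [x]) (fun y hy => hw y (by simp [hy]))]
    simp

theorem wordsCont_break (cur l : List String) (hc : cur ≠ [])
    (hl : l = [] ∨ ∃ t, l = " " :: t) :
    wordsCont cur l = PySem.Str.join "" cur :: wordsCont [] l := by
  rcases hl with rfl | ⟨t, rfl⟩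
  · simp [wordsCont, hc]
  · simp [wordsCont, hc]

theorem skipA_words (a : List String) (n i : Int) (h0 : 0 ≤ i) (hn : n ≤ (a.length : Int)) :
    wordsCont [] (seg a i n) = wordsCont [] (seg a (skipA a n i) n) := by
  fun_induction skipA a n i with
  | case1 i h ih =>
    rw [seg_cons a i n h0 h.1 hn, h.2, wordsCont, if_pos rfl]
    simpa using ih (by omega)
  | case2 i h => rfl

theorem skipA_exit (a : List String) (n i : Int) (h : skipA a n i < n) :
    ¬ PySem.List.pyGetD a (skipA a n i) "" = " " := by
  fun_induction skipA a n i with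
  | case1 i hc ih => exact ih h
  | case2 i hc => intro hs; exact hc ⟨h, hs⟩

theorem skipA_le (a : List String) (n i : Int) (h : i ≤ n) : skipA a n i ≤ n := by
  fun_induction skipA a n i with
  | case1 i hc ih => exact ih (by omega)
  | case2 i hc => omega

theorem take_set_succ {α : Type} (l : List α) (k : Nat) (v : α) (h : k < l.length) :
    (l.set k v).take (k + 1) = l.take k ++ [v] := by
  rw [List.take_add_one, List.take_set, List.set_eq_of_length_le (by simp [List.length_take]),
      List.getElem?_set_self h]
  rfl

theorem copyA_spec (a : List String) (n i j : Int) (h0 : 0 ≤ i) (hj : 0 ≤ j) (hji : j ≤ i)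
    (hn : n ≤ (a.length : Int)) :
    ((copyA a n i j).1.length = a.length) ∧
    (copyA a n i j).2.1 = i + ((seg a i n).takeWhile (fun x => x != " ")).length ∧
    (copyA a n i j).2.2 = j + ((seg a i n).takeWhile (fun x => x != " ")).length ∧
    (copyA a n i j).1.take ((copyA a n i j).2.2).toNat
      = a.take j.toNat ++ (seg a i n).takeWhile (fun x => x != " ") ∧
    seg (copyA a n i j).1 (copyA a n i j).2.1 n = (seg a i n).dropWhile (fun x => x != " ") ∧
    ((copyA a n i j).2.1 < n → PySem.List.pyGetD (copyA a n i j).1 (copyA a n i j).2.1 "" = " ") := by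
  fun_induction copyA a n i j with
  | case1 a i j hc ih =>
    obtain ⟨hin, hx⟩ := hc
    have hv : (PySem.List.pyGetD a i "" != " ") = true := by simp [hx]
    have hseg : seg a i n = PySem.List.pyGetD a i "" :: seg a (i + 1) n := seg_cons a i n h0 hin hn
    have ha2 : PySem.List.pySetD a j (PySem.List.pyGetD a i "")
        = a.set j.toNat (PySem.List.pyGetD a i "") := PySem.List.pySetD_of_nonneg a _ hj
    have hjlen : j.toNat < a.length := by omega
    have hsg2 : seg (a.set j.toNat (PySem.List.pyGetD a i "")) (i + 1) n = seg a (i + 1) n :=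
      seg_set_high a _ (i + 1) n j hj (by omega)
    obtain ⟨L1, L2, L3, L4, L5, L6⟩ := ih (by omega) (by omega) (by omega) (by rw [ha2]; simpa using hn)
    simp only [ha2] at L1 L2 L3 L4 L5 L6 ⊢
    rw [hsg2] at L2 L3 L4 L5
    have hw : (seg a i n).takeWhile (fun x => x != " ")
        = PySem.List.pyGetD a i "" :: (seg a (i + 1) n).takeWhile (fun x => x != " ") := by
      rw [hseg]; simp [hx]
    refine ⟨by simpa using L1, ?_, ?_, ?_, ?_, L6⟩
    · rw [L2, hw]; simp; omega
    · rw [L3, hw]; simp; omega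
    · rw [L4, hw, show (j + 1).toNat = j.toNat + 1 by omega, take_set_succ a j.toNat _ hjlen]
      simp
    · rw [L5, hseg]; simp [hx]
  | case2 a i j hc =>
    push Not at hc
    by_cases hin : i < n
    · have hv := hc hin
      have hv' : (PySem.List.pyGetD a i "" != " ") = false := by simp [hv]
      have hseg : seg a i n = PySem.List.pyGetD a i "" :: seg a (i + 1) n := seg_cons a i n h0 hin hn
      have hw : (seg a i n).takeWhile (fun x => x != " ") = [] := by
        rw [hseg]; simp [hv]
      refine ⟨rfl, by simp [hw], by simp [hw], by simp [hw], ?_, fun _ => hv⟩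
      rw [hseg]; simp [hv]
    · have hseg : seg a i n = [] := seg_nil a i n (by omega)
      refine ⟨rfl, by simp [hseg], by simp [hseg], by simp [hseg], by simp [hseg], fun hh => absurd hh hin⟩

theorem cat_single (x : String) : cat [x] = x.toList := by simp [cat]

theorem sj_nil : sj [] = [] := by simp [sj, List.intercalate]

theorem length_tw_le {p : String → Bool} (l : List String) : (l.takeWhile p).length ≤ l.length :=
  (List.takeWhile_sublist p).length_le

theorem loopA_spec (a : List String) (n i j : Int) (h0 : 0 ≤ i) (hj : 0 ≤ j) (hji : j ≤ i)
    (hn : n ≤ (a.length : Int)) :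
    0 ≤ (loopA a n i j).2 ∧
    cat ((loopA a n i j).1.take ((loopA a n i j).2).toNat)
      = cat (a.take j.toNat) ++ sj (wordsCont [] (seg a i n)) := by
  fun_induction loopA a n i j with
  | case1 a i j h r i3 h3 ih =>
    have hr : r = copyA a n (skipA a n i) j := rfl
    have hi3 : i3 = skipA r.1 n r.2.1 := rfl
    have hi1a : i ≤ skipA a n i := skipA_ge a n i
    have hi1b : skipA a n i ≤ n := skipA_le a n i (le_of_lt h)
    obtain ⟨C1, C2, C3, C4, C5, C6⟩ := copyA_spec a n (skipA a n i) j (by omega) hj (by omega) hn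
    rw [← hr] at C1 C2 C3 C4 C5 C6
    have hsl : (seg a (skipA a n i) n).length ≤ n.toNat - (skipA a n i).toNat := by
      simp [seg]; omega
    have hlw := length_tw_le (p := fun x => x != " ") (seg a (skipA a n i) n)
    have hi2n : r.2.1 ≤ n := by omega
    have hi3a : r.2.1 ≤ i3 := hi3 ▸ skipA_ge r.1 n r.2.1
    have hln1 : n ≤ (r.1.length : Int) := by rw [C1]; exact hn
    by_cases hi1 : skipA a n i < n
    · -- a word starts at i1; the loop copies it and writes a separator
      have hx1 : ¬ PySem.List.pyGetD a (skipA a n i) "" = " " := skipA_exit a n i hi1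
      have hsegc : seg a (skipA a n i) n
          = PySem.List.pyGetD a (skipA a n i) "" :: seg a (skipA a n i + 1) n :=
        seg_cons a _ n (by omega) hi1 hn
      have hwne : (seg a (skipA a n i) n).takeWhile (fun x => x != " ") ≠ [] := by
        rw [hsegc]; simp [hx1]
      have hx2 : PySem.List.pyGetD r.1 r.2.1 "" = " " := C6 (by omega)
      have hstep : i3 = skipA r.1 n (r.2.1 + 1) := by
        rw [hi3, skipA, dif_pos ⟨by omega, hx2⟩]
      have hi3c : r.2.1 + 1 ≤ i3 := hstep ▸ skipA_ge r.1 n (r.2.1 + 1)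
      have hset : PySem.List.pySetD r.1 r.2.2 " " = r.1.set r.2.2.toNat " " :=
        PySem.List.pySetD_of_nonneg r.1 " " (by omega)
      obtain ⟨I1, I2⟩ := ih (by omega) (by omega) (by omega) (by rw [hset]; simpa using hln1)
      refine ⟨I1, ?_⟩
      rw [I2, hset, seg_set_high r.1 " " i3 n r.2.2 (by omega) (by omega),
          show (r.2.2 + 1).toNat = r.2.2.toNat + 1 by omega,
          take_set_succ r.1 r.2.2.toNat " " (by omega), cat_append, C4, cat_append, cat_single]
      -- words chain
      have W1 : wordsCont [] (seg a i n) = wordsCont [] (seg a (skipA a n i) n) :=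
        skipA_words a n i h0 hn
      have W2 : wordsCont [] (seg a (skipA a n i) n)
          = wordsCont ((seg a (skipA a n i) n).takeWhile (fun x => x != " "))
              ((seg a (skipA a n i) n).dropWhile (fun x => x != " ")) := by
        conv_lhs => rw [← List.takeWhile_append_dropWhile (p := fun x => x != " ")
          (l := seg a (skipA a n i) n)]
        rw [wordsCont_run _ _ _ (fun x hx => by simpa using List.mem_takeWhile_imp hx)]
        simp
      have hrest : seg r.1 r.2.1 n = [] ∨ ∃ t, seg r.1 r.2.1 n = " " :: t := by
        by_cases hh : r.2.1 < n
        · refine Or.inr ⟨seg r.1 (r.2.1 + 1) n, ?_⟩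
          rw [seg_cons r.1 r.2.1 n (by omega) hh hln1, hx2]
        · exact Or.inl (seg_nil _ _ _ (by omega))
      have W3 : wordsCont ((seg a (skipA a n i) n).takeWhile (fun x => x != " "))
            (seg r.1 r.2.1 n)
          = PySem.Str.join "" ((seg a (skipA a n i) n).takeWhile (fun x => x != " "))
              :: wordsCont [] (seg r.1 r.2.1 n) :=
        wordsCont_break _ _ hwne hrest
      have W4 : wordsCont [] (seg r.1 r.2.1 n) = wordsCont [] (seg r.1 i3 n) :=
        hi3 ▸ skipA_words r.1 n r.2.1 (by omega) hln1
      have hx3 : ¬ PySem.List.pyGetD r.1 i3 "" = " " := hi3 ▸ skipA_exit r.1 n r.2.1 (hi3 ▸ h3)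
      have Wne : wordsCont [] (seg r.1 i3 n) ≠ [] := by
        rw [seg_cons r.1 i3 n (by omega) h3 hln1, wordsCont, if_neg hx3]
        simpa using wordsCont_ne_nil [PySem.List.pyGetD r.1 i3 ""] _ (by simp)
      rw [W1, W2, ← C5, W3, W4, sj_cons, if_neg Wne, toList_join0]
      simp [List.append_assoc]
    · -- only trailing spaces: the copy is empty and the loop would stop; contradicts i3 < n
      exfalso
      have hw0 : (seg a (skipA a n i) n).takeWhile (fun x => x != " ") = [] := by
        rw [seg_nil a _ n (by omega)]; rfl
      have : i3 ≤ n := hi3 ▸ skipA_le r.1 n r.2.1 hi2n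
      rw [hw0] at C2
      simp at C2
      -- i2 = i1 = n, so i3 = skipA r.1 n n = n
      have : i3 = skipA r.1 n r.2.1 := hi3
      rw [this, C2, skipA] at h3
      rw [dif_neg (by omega)] at h3
      omega
  | case2 a i j h r i3 h3 ih =>
    have hr : r = copyA a n (skipA a n i) j := rfl
    have hi3 : i3 = skipA r.1 n r.2.1 := rfl
    have hi1a : i ≤ skipA a n i := skipA_ge a n i
    have hi1b : skipA a n i ≤ n := skipA_le a n i (le_of_lt h)
    obtain ⟨C1, C2, C3, C4, C5, C6⟩ := copyA_spec a n (skipA a n i) j (by omega) hj (by omega) hn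
    rw [← hr] at C1 C2 C3 C4 C5 C6
    have hsl : (seg a (skipA a n i) n).length ≤ n.toNat - (skipA a n i).toNat := by
      simp [seg]; omega
    have hlw := length_tw_le (p := fun x => x != " ") (seg a (skipA a n i) n)
    have hi3a : r.2.1 ≤ i3 := hi3 ▸ skipA_ge r.1 n r.2.1
    have hln1 : n ≤ (r.1.length : Int) := by rw [C1]; exact hn
    obtain ⟨I1, I2⟩ := ih (by omega) (by omega) (by omega) hln1
    refine ⟨I1, ?_⟩
    rw [I2, seg_nil r.1 i3 n (by omega), C4, cat_append]
    have W1 : wordsCont [] (seg a i n) = wordsCont [] (seg a (skipA a n i) n) :=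
      skipA_words a n i h0 hn
    have W4 : wordsCont [] (seg r.1 r.2.1 n) = wordsCont [] (seg r.1 i3 n) :=
      hi3 ▸ skipA_words r.1 n r.2.1 (by omega) hln1
    have W0 : wordsCont [] (seg r.1 i3 n) = [] := by rw [seg_nil r.1 i3 n (by omega)]; rfl
    by_cases hi1 : skipA a n i < n
    · have hx1 : ¬ PySem.List.pyGetD a (skipA a n i) "" = " " := skipA_exit a n i hi1
      have hsegc : seg a (skipA a n i) n
          = PySem.List.pyGetD a (skipA a n i) "" :: seg a (skipA a n i + 1) n :=
        seg_cons a _ n (by omega) hi1 hn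
      have hwne : (seg a (skipA a n i) n).takeWhile (fun x => x != " ") ≠ [] := by
        rw [hsegc]; simp [hx1]
      have W2 : wordsCont [] (seg a (skipA a n i) n)
          = wordsCont ((seg a (skipA a n i) n).takeWhile (fun x => x != " "))
              ((seg a (skipA a n i) n).dropWhile (fun x => x != " ")) := by
        conv_lhs => rw [← List.takeWhile_append_dropWhile (p := fun x => x != " ")
          (l := seg a (skipA a n i) n)]
        rw [wordsCont_run _ _ _ (fun x hx => by simpa using List.mem_takeWhile_imp hx)]
        simp
      have hrest : seg r.1 r.2.1 n = [] ∨ ∃ t, seg r.1 r.2.1 n = " " :: t := by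
        by_cases hh : r.2.1 < n
        · refine Or.inr ⟨seg r.1 (r.2.1 + 1) n, ?_⟩
          rw [seg_cons r.1 r.2.1 n (by omega) hh hln1, C6 hh]
        · exact Or.inl (seg_nil _ _ _ (by omega))
      have W3 : wordsCont ((seg a (skipA a n i) n).takeWhile (fun x => x != " "))
            (seg r.1 r.2.1 n)
          = PySem.Str.join "" ((seg a (skipA a n i) n).takeWhile (fun x => x != " "))
              :: wordsCont [] (seg r.1 r.2.1 n) :=
        wordsCont_break _ _ hwne hrest
      rw [W1, W2, ← C5, W3, W4, W0, sj_cons, if_pos rfl, toList_join0]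
      simp [wordsCont, sj_nil]
    · have hw0 : (seg a (skipA a n i) n).takeWhile (fun x => x != " ") = [] := by
        rw [seg_nil a _ n (by omega)]; rfl
      rw [W1, seg_nil a _ n (by omega)]
      simp [wordsCont, sj_nil, cat]
  | case3 a i j h =>
    refine ⟨hj, ?_⟩
    rw [seg_nil a i n (by omega)]
    simp [wordsCont, sj_nil]

theorem bFold_spec (l : List String) (ws cur : List String) :
    (let st := l.foldl bStep (ws, cur);
     if st.2 = [] then st.1 else st.1 ++ [PySem.Str.join "" st.2]) = ws ++ wordsCont cur l := by
  induction l generalizing ws cur with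
  | nil => by_cases hc : cur = [] <;> simp [wordsCont, hc]
  | cons x t ih =>
    by_cases hx : x = " "
    · by_cases hc : cur = []
      · subst hc
        simpa [bStep, hx, wordsCont] using ih ws []
      · have := ih (ws ++ [PySem.Str.join "" cur]) []
        simp only [List.foldl_cons, bStep, if_pos hx, if_neg hc] at *
        simp_all [wordsCont]
    · have := ih ws (cur ++ [x])
      simp only [List.foldl_cons, bStep, if_neg hx] at *
      simp_all [wordsCont]

-- ===== VERDICT (by name: the statement is the Claim_ definition above) =====
theorem cleanSpaces_spec : Claim_equal_cleanSpaces := by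
  intro a n _ hp
  have hn : n ≤ (a.length : Int) := hp
  obtain ⟨J1, J2⟩ := loopA_spec a n 0 0 le_rfl le_rfl le_rfl hn
  unfold Spec_cleanSpaces cleanSpaces cleanSpaces_alt
  simp only []
  rw [PySem.List.slice_to _ J1, PySem.List.slice_to _ (by omega : (0 : Int) ≤ max n 0),
      show (max n 0).toNat = n.toNat by omega]
  rw [← String.toList_inj, toList_join0, sj_eq]
  have hb := bFold_spec (a.take n.toNat) [] []
  simp only [] at hb
  rw [hb, List.nil_append, J2, show seg a 0 n = a.take n.toNat by simp [seg]]
  simp [cat]
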